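-- pv_equiv track=rewrite | github.com/PY-Develop-Company/Signal-bot | tv_signals/indicators_reader.py | pivot_high
-- ===== SOURCE A (Python) =====
-- def pivot_high(price):
--     highs = {}
--     prices_count = len(price) - 1
--     nearest_high_price = price[prices_count]
--     for i in range(prices_count - 1, 0, -1):
--         if price[i - 1] < price[i] > price[i + 1]:
--             nearest_high_price = price[i]
--         highs.update({i: nearest_high_price})
--     highs.update({0: nearest_high_price})
--     return highs
-- ===== SOURCE B (Python) =====
-- def pivot_high(price):
--     n = len(price)
--     default = price[n - 1]
--     pivots = [p for p in range(1, n - 1) if price[p - 1] < price[p] > price[p + 1]]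
--     # vals[i-1] is the value for index i (1 <= i <= n-2): price at the first
--     # pivot >= i, or the last price if there is none.
--     vals = []
--     start = 1
--     for p in pivots:
--         vals.extend([price[p]] * (p - start + 1))
--         start = p + 1
--     vals.extend([default] * (n - 1 - start))
--     out = [(i, vals[i - 1]) for i in range(n - 2, 0, -1)]
--     out.append((0, vals[0] if vals else default))
--     return dict(out)
-- ===== Notes on version B (the rewrite author's own statement) =====
-- stated objective: alternative
-- what changed: A walks the list backwards carrying a running nearest-pivot value; B first collects all pivot indices in a forward scan, then block-fills each contiguous index range with its pivot's price and assembles the pair list, so no running state crosses the loop.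
import Mathlib
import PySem

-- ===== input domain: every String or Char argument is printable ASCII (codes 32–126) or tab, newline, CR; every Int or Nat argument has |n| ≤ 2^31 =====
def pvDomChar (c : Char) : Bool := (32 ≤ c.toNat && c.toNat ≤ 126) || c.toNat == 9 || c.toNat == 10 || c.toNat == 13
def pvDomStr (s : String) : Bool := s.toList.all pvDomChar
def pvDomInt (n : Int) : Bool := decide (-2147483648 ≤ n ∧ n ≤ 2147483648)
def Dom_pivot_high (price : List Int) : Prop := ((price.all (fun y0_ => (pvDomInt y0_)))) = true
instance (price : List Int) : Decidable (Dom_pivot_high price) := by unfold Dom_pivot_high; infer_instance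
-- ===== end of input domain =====

-- B rebuilds the map from a forward pivot scan and block fills, instead of A's backward running-state loop (objective: alternative decomposition).

-- ===== PORT A =====
-- backward loop carrying the nearest pivot-high price, inserting keys n-2 .. 1, then 0
def pivot_high (price : List Int) : List (Int × Int) :=
  let pc : Int := (price.length : Int) - 1
  let nh0 : Int := PySem.List.pyGetD price pc 0   -- price[pc]; Pre_ excludes the empty list, where Python raises IndexError
  let r := (PySem.List.pyRange (pc - 1) 0 (-1)).foldl
    (fun (s : PySem.Dict Int Int × Int) i =>
      let nh := if PySem.List.pyGetD price (i - 1) 0 < PySem.List.pyGetD price i 0 ∧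
                   PySem.List.pyGetD price i 0 > PySem.List.pyGetD price (i + 1) 0
                then PySem.List.pyGetD price i 0 else s.2
      (s.1.insert i nh, nh))
    (PySem.Dict.empty, nh0)
  (r.1.insert 0 r.2).items

-- ===== PORT B =====
-- forward scan collecting pivot indices, then block-fill of values, then assembly of the pair list
def pivot_high_alt (price : List Int) : List (Int × Int) :=
  let n : Int := (price.length : Int)
  let dflt : Int := PySem.List.pyGetD price (n - 1) 0   -- price[n-1]; raises on [] like A, excluded by Pre_
  let pivots : List Int := (PySem.List.pyRange 1 (n - 1) 1).filter
    (fun p => decide (PySem.List.pyGetD price (p - 1) 0 < PySem.List.pyGetD price p 0 ∧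
                      PySem.List.pyGetD price p 0 > PySem.List.pyGetD price (p + 1) 0))
  let vs := pivots.foldl
    (fun (acc : List Int × Int) p =>
      (acc.1 ++ List.replicate (p - acc.2 + 1).toNat (PySem.List.pyGetD price p 0), p + 1))
    ([], 1)
  let vals := vs.1 ++ List.replicate (n - 1 - vs.2).toNat dflt
  let out := (PySem.List.pyRange (n - 2) 0 (-1)).map
    (fun i => (i, PySem.List.pyGetD vals (i - 1) 0))
  let out2 := out ++ [(0, match vals with | [] => dflt | v :: _ => v)]
  -- dict(out2): keys are distinct, transliterated as the insert fold
  (out2.foldl (fun (d : PySem.Dict Int Int) p => d.insert p.1 p.2) PySem.Dict.empty).items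

-- ===== PRECONDITION & SPEC =====
-- Pre_ excludes only the empty list, on which Python A raises IndexError (price[-1]).
def Pre_pivot_high (price : List Int) : Prop := price ≠ []
instance (price : List Int) : Decidable (Pre_pivot_high price) := by unfold Pre_pivot_high; infer_instance
def pvWitness_pivot_high : List Int := ([3, 5, 2, 4, 1])
def Spec_pivot_high (price : List Int) (out : List (Int × Int)) : Prop := out = pivot_high_alt price
instance (price : List Int) (out : List (Int × Int)) : Decidable (Spec_pivot_high price out) := by unfold Spec_pivot_high; infer_instance

-- ===== CLAIM (what is proved, stated in full; the proofs are below) =====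
def Claim_equal_pivot_high : Prop := ∀ (price : List Int), Dom_pivot_high price → Pre_pivot_high price → Spec_pivot_high price (pivot_high price)

-- ===== LEMMAS AND PROOFS =====

-- the shared pivot condition, pivot list, and nearest-forward-pivot value (proof-side only)
def pvPiv (price : List Int) (i : Int) : Bool :=
  decide (PySem.List.pyGetD price (i - 1) 0 < PySem.List.pyGetD price i 0 ∧
          PySem.List.pyGetD price i 0 > PySem.List.pyGetD price (i + 1) 0)

def pvPivots (price : List Int) : List Int :=
  (PySem.List.pyRange 1 ((price.length : Int) - 1) 1).filter (pvPiv price)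

def pvV (price : List Int) (i : Int) : Int :=
  match (pvPivots price).find? (fun p => decide (i ≤ p)) with
  | some p => PySem.List.pyGetD price p 0
  | none => PySem.List.pyGetD price ((price.length : Int) - 1) 0

theorem pvPivots_sorted (price : List Int) : (pvPivots price).Pairwise (· < ·) :=
  (PySem.List.pairwise_lt_pyRange_one 1 ((price.length : Int) - 1)).filter _

theorem mem_pvPivots (price : List Int) (i : Int) :
    i ∈ pvPivots price ↔ (1 ≤ i ∧ i < (price.length : Int) - 1 ∧ pvPiv price i = true) := by
  simp [pvPivots, List.mem_filter, PySem.List.mem_pyRange_one]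
  tauto

theorem find?_ge_none (l : List Int) (q : Int) (h : ∀ p ∈ l, p < q) :
    l.find? (fun p => decide (q ≤ p)) = none := by
  rw [List.find?_eq_none]
  intro p hp
  simpa using not_le.mpr (h p hp)

theorem find?_ge_min (l : List Int) (hl : l.Pairwise (· < ·)) (p q : Int)
    (hp : p ∈ l) (hq : q ≤ p) (hmin : ∀ r ∈ l, q ≤ r → p ≤ r) :
    l.find? (fun x => decide (q ≤ x)) = some p := by
  induction l with
  | nil => simp at hp
  | cons a t ih =>
    rcases List.pairwise_cons.mp hl with ⟨ha, ht⟩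
    by_cases hqa : q ≤ a
    · have hpa : p = a := by
        have := hmin a (by simp) hqa
        rcases List.mem_cons.mp hp with h | h
        · omega
        · exact absurd (ha p h) (by omega)
      simp [hqa, hpa]
    · have hpt : p ∈ t := by
        rcases List.mem_cons.mp hp with h | h
        · omega
        · exact h
      rw [List.find?_cons_of_neg (by simpa using hqa)]
      exact ih ht hpt (fun r hr hqr => hmin r (List.mem_cons_of_mem _ hr) hqr)

theorem find?_congr_mem {α : Type} (l : List α) (p q : α → Bool)
    (h : ∀ a ∈ l, p a = q a) : l.find? p = l.find? q := by
  induction l with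
  | nil => rfl
  | cons a t ih =>
    rw [List.find?_cons, List.find?_cons, h a (by simp),
      ih (fun a ha => h a (List.mem_cons_of_mem _ ha))]

theorem pvV_rec (price : List Int) (i : Int) (h1 : 1 ≤ i) (h2 : i ≤ (price.length : Int) - 2) :
    pvV price i = if pvPiv price i = true then PySem.List.pyGetD price i 0 else pvV price (i + 1) := by
  by_cases hp : pvPiv price i = true
  · have hi : i ∈ pvPivots price := (mem_pvPivots price i).mpr ⟨h1, by omega, hp⟩
    rw [pvV, find?_ge_min (pvPivots price) (pvPivots_sorted price) i i hi le_rfl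
      (fun r _ h => h)]
    simp [hp]
  · have hni : i ∉ pvPivots price := fun h => hp ((mem_pvPivots price i).mp h).2.2
    have hcg : (pvPivots price).find? (fun p => decide (i ≤ p)) =
        (pvPivots price).find? (fun p => decide (i + 1 ≤ p)) := by
      apply find?_congr_mem
      intro a ha
      have : a ≠ i := fun h => hni (h ▸ ha)
      simp only [decide_eq_decide]
      omega
    rw [pvV, hcg, pvV]
    simp [hp]

theorem pvV_top (price : List Int) : pvV price ((price.length : Int) - 1) =
    PySem.List.pyGetD price ((price.length : Int) - 1) 0 := by
  rw [pvV, find?_ge_none]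
  intro p hp
  exact ((mem_pvPivots price p).mp hp).2.1

theorem pvPivots_nil (price : List Int) (h : (price.length : Int) ≤ 2) :
    pvPivots price = [] := by
  rw [pvPivots, PySem.List.pyRange_one_eq_nil (by omega)]
  rfl

theorem pvV_of_nil (price : List Int) (h : (price.length : Int) ≤ 2) (i : Int) :
    pvV price i = PySem.List.pyGetD price ((price.length : Int) - 1) 0 := by
  rw [pvV, pvPivots_nil price h]
  rfl

-- the body of A's loop, verbatim
def stepA (price : List Int) (s : PySem.Dict Int Int × Int) (i : Int) : PySem.Dict Int Int × Int :=
  let nh := if PySem.List.pyGetD price (i - 1) 0 < PySem.List.pyGetD price i 0 ∧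
               PySem.List.pyGetD price i 0 > PySem.List.pyGetD price (i + 1) 0
            then PySem.List.pyGetD price i 0 else s.2
  (s.1.insert i nh, nh)

theorem foldA (price : List Int) (mn : Nat) : ∀ (m : Int) (d : PySem.Dict Int Int) (nh : Int),
    m.toNat = mn → m ≤ (price.length : Int) - 2 →
    (∀ k ∈ d.keys, m < k) → d.keys.Nodup → nh = pvV price (m + 1) →
    (PySem.List.pyRange m 0 (-1)).foldl (stepA price) (d, nh) =
      (PySem.Dict.mk (d.items ++ (PySem.List.pyRange m 0 (-1)).map (fun i => (i, pvV price i))),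
       if 1 ≤ m then pvV price 1 else nh) := by
  induction mn with
  | zero =>
    intro m d nh hmn hm hk hnd hnh
    have hm0 : m ≤ 0 := by omega
    rw [PySem.List.pyRange_neg_one_eq_nil hm0]
    simp [if_neg (by omega : ¬ (1:Int) ≤ m)]
  | succ k ih =>
    intro m d nh hmn hm hk hnd hnh
    have hm1 : 1 ≤ m := by omega
    rw [PySem.List.pyRange_neg_one_cons (by omega : (0:Int) < m)]
    have hnh' : (stepA price (d, nh) m).2 = pvV price m := by
      rw [pvV_rec price m hm1 hm, stepA]
      by_cases hc : PySem.List.pyGetD price (m - 1) 0 < PySem.List.pyGetD price m 0 ∧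
          PySem.List.pyGetD price m 0 > PySem.List.pyGetD price (m + 1) 0
      · simp [hc, pvPiv]
      · simp [hc, pvPiv, hnh]
    have hmem : m ∉ d.keys := fun h => absurd (hk m h) (by omega)
    have hcon : d.contains m = false := by
      rw [PySem.Dict.contains_eq_decide_mem_keys]
      simpa using hmem
    have hstep : stepA price (d, nh) m =
        (PySem.Dict.mk (d.items ++ [(m, pvV price m)]), pvV price m) := by
      have h1 : (stepA price (d, nh) m).1 = d.insert m (pvV price m) := by
        rw [stepA]
        simp only []
        rw [← hnh']
        rfl
      have := hnh'
      apply Prod.ext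
      · rw [h1]
        apply PySem.Dict.ext
        rw [PySem.Dict.items_insert_of_not_contains _ _ hcon]
      · exact hnh'
    rw [List.foldl_cons, hstep]
    have hkeys : (PySem.Dict.mk (d.items ++ [(m, pvV price m)])).keys = d.keys ++ [m] := by
      simp [PySem.Dict.keys]
    rw [ih (m - 1) _ _ (by omega) (by omega)
      (by
        rw [hkeys]
        intro x hx
        rcases List.mem_append.mp hx with h | h
        · have := hk x h; omega
        · simp at h; omega)
      (by
        rw [hkeys]
        exact List.Nodup.append hnd (List.nodup_singleton m)
          (by simpa [List.disjoint_singleton] using hmem))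
      (by congr 1; omega)]
    apply Prod.ext
    · simp only []
      congr 1
      simp
    · simp only []
      by_cases h2 : (1:Int) ≤ m - 1
      · rw [if_pos h2, if_pos hm1]
      · have : m = 1 := by omega
        subst this
        simp

-- the body of B's block-fill loop, verbatim
def stepB (price : List Int) (acc : List Int × Int) (p : Int) : List Int × Int :=
  (acc.1 ++ List.replicate (p - acc.2 + 1).toNat (PySem.List.pyGetD price p 0), p + 1)

theorem foldB (price : List Int) : ∀ (P : List Int) (acc : List Int) (start : Int),
    1 ≤ start → P.Pairwise (· < ·) →
    (∀ p ∈ P, start ≤ p ∧ p ∈ pvPivots price) →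
    (∀ q ∈ pvPivots price, start ≤ q → q ∈ P) →
    (P.foldl (stepB price) (acc, start)).1 =
        acc ++ (PySem.List.pyRange start (P.foldl (stepB price) (acc, start)).2 1).map (pvV price) ∧
      start ≤ (P.foldl (stepB price) (acc, start)).2 ∧
      ((P.foldl (stepB price) (acc, start)).2 = start ∨
        ∃ p ∈ P, (P.foldl (stepB price) (acc, start)).2 = p + 1) ∧
      (∀ q ∈ pvPivots price, q < (P.foldl (stepB price) (acc, start)).2) := by
  intro P
  induction P with
  | nil =>
    intro acc start h1 _ _ hall
    refine ⟨by simp [PySem.List.pyRange_one_eq_nil le_rfl], le_rfl, Or.inl rfl, ?_⟩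
    intro q hq
    by_contra hlt
    exact absurd (hall q hq (by simpa using hlt)) (by simp)
  | cons p rest ih =>
    intro acc start h1 hpw hmem hall
    rcases List.pairwise_cons.mp hpw with ⟨hpr, hpw'⟩
    have hps : start ≤ p := (hmem p (by simp)).1
    have hppiv : p ∈ pvPivots price := (hmem p (by simp)).2
    have hrep : List.replicate (p - start + 1).toNat (PySem.List.pyGetD price p 0) =
        (PySem.List.pyRange start (p + 1) 1).map (pvV price) := by
      symm
      rw [List.eq_replicate_iff]
      constructor
      · rw [List.length_map, PySem.List.length_pyRange_one]
        omega
      · intro b hb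
        rcases List.mem_map.mp hb with ⟨q, hq, rfl⟩
        rcases (PySem.List.mem_pyRange_one).mp hq with ⟨hq1, hq2⟩
        rw [pvV, find?_ge_min (pvPivots price) (pvPivots_sorted price) p q hppiv (by omega)]
        intro r hr hqr
        by_contra hrp
        rcases List.mem_cons.mp (hall r hr (by omega)) with h | h
        · omega
        · exact absurd (hpr r h) (by omega)
    have hstep : stepB price (acc, start) p =
        (acc ++ (PySem.List.pyRange start (p + 1) 1).map (pvV price), p + 1) := by
      rw [stepB, hrep]
    rw [List.foldl_cons, hstep]
    obtain ⟨ha, hb, hc, hd⟩ := ih (acc ++ (PySem.List.pyRange start (p + 1) 1).map (pvV price))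
      (p + 1) (by omega) hpw'
      (by
        intro x hx
        exact ⟨hpr x hx, (hmem x (List.mem_cons_of_mem _ hx)).2⟩)
      (by
        intro q hq hq2
        rcases List.mem_cons.mp (hall q hq (by omega)) with h | h
        · omega
        · exact h)
    refine ⟨?_, by omega, ?_, fun q hq => hd q hq⟩
    · rw [ha, List.append_assoc, ← List.map_append,
        ← PySem.List.pyRange_one_append start (p + 1) _ (by omega) hb]
    · rcases hc with h | ⟨x, hx, h⟩
      · exact Or.inr ⟨p, by simp, h⟩
      · exact Or.inr ⟨x, List.mem_cons_of_mem _ hx, h⟩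

theorem aEq (price : List Int) :
    pivot_high price = (PySem.List.pyRange ((price.length : Int) - 2) 0 (-1)).map
      (fun i => (i, pvV price i)) ++ [(0, pvV price 1)] := by
  have e : pivot_high price =
      ((((PySem.List.pyRange ((price.length : Int) - 1 - 1) 0 (-1)).foldl (stepA price)
          (PySem.Dict.empty, PySem.List.pyGetD price ((price.length : Int) - 1) 0)).1.insert 0
        (((PySem.List.pyRange ((price.length : Int) - 1 - 1) 0 (-1)).foldl (stepA price)
          (PySem.Dict.empty, PySem.List.pyGetD price ((price.length : Int) - 1) 0)).2)).items) := rfl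
  have hfold := foldA price ((price.length : Int) - 1 - 1).toNat ((price.length : Int) - 1 - 1)
    PySem.Dict.empty (PySem.List.pyGetD price ((price.length : Int) - 1) 0) rfl (by omega)
    (by simp) (by simp)
    (by rw [show (price.length : Int) - 1 - 1 + 1 = (price.length : Int) - 1 by ring, pvV_top])
  rw [e, hfold]
  dsimp only
  have hcon0 : (PySem.Dict.mk ((PySem.Dict.empty : PySem.Dict Int Int).items ++
      (PySem.List.pyRange ((price.length : Int) - 1 - 1) 0 (-1)).map
        (fun i => (i, pvV price i)))).contains 0 = false := by
    rw [PySem.Dict.contains_eq_decide_mem_keys]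
    simp only [PySem.Dict.keys, decide_eq_false_iff_not]
    intro h
    rcases List.mem_map.mp h with ⟨⟨a, b⟩, hab, hfst⟩
    rcases List.mem_append.mp hab with h' | h'
    · simp [PySem.Dict.empty] at h'
    · rcases List.mem_map.mp h' with ⟨j, hj, hj2⟩
      have := (PySem.List.mem_pyRange_neg_one).mp hj
      cases hj2
      simp at hfst
      omega
  rw [PySem.Dict.items_insert_of_not_contains _ _ hcon0]
  rw [show (price.length : Int) - 1 - 1 = (price.length : Int) - 2 by ring]
  by_cases hm1 : (1 : Int) ≤ (price.length : Int) - 2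
  · rw [if_pos hm1]
    simp [PySem.Dict.empty]
  · rw [if_neg hm1]
    rw [pvV_of_nil price (by omega) 1]
    simp [PySem.Dict.empty]

theorem altEq (price : List Int) :
    pivot_high_alt price = (PySem.List.pyRange ((price.length : Int) - 2) 0 (-1)).map
      (fun i => (i, pvV price i)) ++ [(0, pvV price 1)] := by
  obtain ⟨h1, h2, h3, h4⟩ := foldB price (pvPivots price) [] 1 le_rfl (pvPivots_sorted price)
    (fun p hp => ⟨((mem_pvPivots price p).mp hp).1, hp⟩) (fun q hq _ => hq)
  have e : pivot_high_alt price =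
      (((PySem.List.pyRange ((price.length : Int) - 2) 0 (-1)).map
          (fun i => (i, PySem.List.pyGetD (((pvPivots price).foldl (stepB price) ([], 1)).1 ++
            List.replicate ((price.length : Int) - 1 -
              ((pvPivots price).foldl (stepB price) ([], 1)).2).toNat
              (PySem.List.pyGetD price ((price.length : Int) - 1) 0)) (i - 1) 0)) ++
        [((0 : Int), match ((pvPivots price).foldl (stepB price) ([], 1)).1 ++
            List.replicate ((price.length : Int) - 1 -
              ((pvPivots price).foldl (stepB price) ([], 1)).2).toNat
              (PySem.List.pyGetD price ((price.length : Int) - 1) 0) with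
          | [] => PySem.List.pyGetD price ((price.length : Int) - 1) 0
          | v :: _ => v)]).foldl
        (fun (d : PySem.Dict Int Int) (p : Int × Int) => d.insert p.1 p.2) PySem.Dict.empty).items := rfl
  have hvals : ((pvPivots price).foldl (stepB price) ([], 1)).1 ++
      List.replicate ((price.length : Int) - 1 -
        ((pvPivots price).foldl (stepB price) ([], 1)).2).toNat
        (PySem.List.pyGetD price ((price.length : Int) - 1) 0)
      = (PySem.List.pyRange 1 ((price.length : Int) - 1) 1).map (pvV price) := by
    by_cases hcase : ((pvPivots price).foldl (stepB price) ([], 1)).2 ≤ (price.length : Int) - 1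
    · have hrep : List.replicate ((price.length : Int) - 1 -
          ((pvPivots price).foldl (stepB price) ([], 1)).2).toNat
          (PySem.List.pyGetD price ((price.length : Int) - 1) 0)
          = (PySem.List.pyRange (((pvPivots price).foldl (stepB price) ([], 1)).2)
              ((price.length : Int) - 1) 1).map (pvV price) := by
        symm
        rw [List.eq_replicate_iff]
        refine ⟨by rw [List.length_map, PySem.List.length_pyRange_one], ?_⟩
        intro b hb
        rcases List.mem_map.mp hb with ⟨q, hq, rfl⟩
        rcases (PySem.List.mem_pyRange_one).mp hq with ⟨hq1, hq2⟩
        rw [pvV, find?_ge_none]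
        intro p hp
        have := h4 p hp
        omega
      rw [h1, hrep, List.nil_append, ← List.map_append,
        ← PySem.List.pyRange_one_append 1 _ _ h2 hcase]
    · have hr1 : ((pvPivots price).foldl (stepB price) ([], 1)).2 = 1 := by
        rcases h3 with h | ⟨p, hp, h⟩
        · exact h
        · have := ((mem_pvPivots price p).mp hp).2.1
          omega
      rw [h1, hr1, PySem.List.pyRange_one_eq_nil le_rfl,
        PySem.List.pyRange_one_eq_nil (by omega : (price.length : Int) - 1 ≤ 1)]
      simp
      omega
  rw [e]
  simp only [hvals]
  have hhead : (match (PySem.List.pyRange 1 ((price.length : Int) - 1) 1).map (pvV price) with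
      | [] => PySem.List.pyGetD price ((price.length : Int) - 1) 0
      | v :: _ => v) = pvV price 1 := by
    by_cases h3n : (1 : Int) < (price.length : Int) - 1
    · rw [PySem.List.pyRange_one_cons h3n]
      simp
    · rw [PySem.List.pyRange_one_eq_nil (by omega)]
      simp
      exact (pvV_of_nil price (by omega) 1).symm
  rw [hhead]
  have hget : ∀ i ∈ PySem.List.pyRange ((price.length : Int) - 2) 0 (-1),
      (i, PySem.List.pyGetD ((PySem.List.pyRange 1 ((price.length : Int) - 1) 1).map (pvV price))
        (i - 1) 0) = (i, pvV price i) := by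
    intro i hi
    have hib := (PySem.List.mem_pyRange_neg_one).mp hi
    have hidx : i - 1 = (((i - 1).toNat : Nat) : Int) := by omega
    have h1i : (1 : Int) + (((i - 1).toNat : Nat) : Int) = i := by omega
    rw [hidx, PySem.List.pyGetD_map_pyRange_one (pvV price) 1 _ _ 0 (by omega), h1i]
  rw [List.map_congr_left hget]
  rw [PySem.Dict.items_foldl_insert_fresh _ _ _ _ (by intro a _; simp [PySem.Dict.contains_empty])
    (by
      rw [List.map_append, List.map_map]
      have : ((PySem.List.pyRange ((price.length : Int) - 2) 0 (-1)).map
          (Prod.fst ∘ fun i => (i, pvV price i))) = PySem.List.pyRange ((price.length : Int) - 2) 0 (-1) := by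
        rw [show (Prod.fst ∘ fun i : Int => (i, pvV price i)) = id from rfl, List.map_id]
      rw [this]
      refine List.Nodup.append ?_ (List.nodup_singleton 0) ?_
      · rw [PySem.List.pyRange_neg_one_eq_reverse, List.nodup_reverse]
        exact PySem.List.nodup_pyRange_one _ _
      · intro x hx hy
        have := (PySem.List.mem_pyRange_neg_one).mp hx
        simp at hy
        omega)]
  simp [PySem.Dict.empty, Function.comp]

theorem pivot_high_spec : Claim_equal_pivot_high := by
  intro price _ _
  unfold Spec_pivot_high
  rw [aEq, altEq]
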